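-- pv_equiv track=rewrite | github.com/Aishwarya-Sanku/pratice | hello.py | find_earliest_index_in_arrayB
-- ===== SOURCE A (Python) =====
-- def find_earliest_index_in_arrayB(arrA, arrB):
--     earliest_index = float('inf')
--     value_with_earliest_index = None
--
--     for value in arrA:
--         try:
--             index_in_arrB = arrB.index(value)
--             if index_in_arrB < earliest_index:
--                 earliest_index = index_in_arrB
--                 value_with_earliest_index = value
--         except ValueError:
--             pass
--
--     return {
--         "value": value_with_earliest_index,
--         "index": earliest_index if earliest_index != float('inf') else -1,
--     }
-- ===== SOURCE B (Python) =====
-- def find_earliest_index_in_arrayB(arrA, arrB):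
--     members = set(arrA)
--     for i, v in enumerate(arrB):
--         if v in members:
--             return {"value": v, "index": i}
--     return {"value": None, "index": -1}
-- ===== Notes on version B (the rewrite author's own statement) =====
-- stated objective: faster
-- what changed: Instead of calling arrB.index for every arrA element and tracking the minimum, B builds a set of arrA once and scans arrB left-to-right, returning at the first element in the set (the minimal index automatically).
import Mathlib
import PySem

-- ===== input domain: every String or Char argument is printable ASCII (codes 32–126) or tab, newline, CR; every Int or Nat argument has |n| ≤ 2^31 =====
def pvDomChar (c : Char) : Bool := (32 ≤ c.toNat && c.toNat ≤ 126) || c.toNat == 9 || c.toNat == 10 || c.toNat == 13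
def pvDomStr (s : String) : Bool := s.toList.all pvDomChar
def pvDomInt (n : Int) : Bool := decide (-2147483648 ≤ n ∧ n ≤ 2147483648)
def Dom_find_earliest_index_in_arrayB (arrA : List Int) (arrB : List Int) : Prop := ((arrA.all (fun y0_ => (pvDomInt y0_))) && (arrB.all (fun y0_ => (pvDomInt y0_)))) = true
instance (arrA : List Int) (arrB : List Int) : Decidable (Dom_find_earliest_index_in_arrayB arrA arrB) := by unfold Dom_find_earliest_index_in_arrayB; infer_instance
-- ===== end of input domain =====

-- B replaces A's per-element arrB.index scans with one left-to-right pass over arrB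
-- guarded by a set built once from arrA (the first hit has the minimal index).

-- ===== PORT A =====
-- loop body: try arrB.index(value); on success compare with the current earliest (none = float('inf'))
def pvStepA (arrB : List Int) (st : Option Int × Option Int) (value : Int) : Option Int × Option Int :=
  match PySem.List.index? arrB value with
  | none => st            -- ValueError: pass
  | some idx =>
    match st.1 with
    | none => (some (idx : Int), some value)
    | some e => if (idx : Int) < e then (some (idx : Int), some value) else st

def find_earliest_index_in_arrayB (arrA : List Int) (arrB : List Int) : List (String × Option Int) :=
  [("value", (arrA.foldl (pvStepA arrB) (none, none)).2),
   ("index", some (match (arrA.foldl (pvStepA arrB) (none, none)).1 with | none => -1 | some e => e))]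

-- ===== PORT B =====
-- for i, v in enumerate(arrB): if v in members: return …
def pvAltGo (members : PySem.Set Int) (i : Int) : List Int → List (String × Option Int)
  | [] => [("value", none), ("index", some (-1))]
  | v :: rest => if v ∈ members then [("value", some v), ("index", some i)] else pvAltGo members (i + 1) rest

def find_earliest_index_in_arrayB_alt (arrA : List Int) (arrB : List Int) : List (String × Option Int) :=
  pvAltGo (PySem.Set.ofList arrA) 0 arrB

-- ===== PRECONDITION & SPEC =====
def Spec_find_earliest_index_in_arrayB (arrA : List Int) (arrB : List Int) (out : List (String × Option Int)) : Prop := out = find_earliest_index_in_arrayB_alt arrA arrB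
instance (arrA : List Int) (arrB : List Int) (out : List (String × Option Int)) : Decidable (Spec_find_earliest_index_in_arrayB arrA arrB out) := by unfold Spec_find_earliest_index_in_arrayB; infer_instance

-- ===== CLAIM (what is proved, stated in full; the proofs are below) =====
def Claim_equal_find_earliest_index_in_arrayB : Prop := ∀ (arrA : List Int) (arrB : List Int), Dom_find_earliest_index_in_arrayB arrA arrB → Spec_find_earliest_index_in_arrayB arrA arrB (find_earliest_index_in_arrayB arrA arrB)

-- ===== LEMMAS AND PROOFS =====

-- A's fold over an empty arrB never changes the state (every index lookup raises)
theorem pv_fold_nil (arrA : List Int) (st : Option Int × Option Int) :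
    arrA.foldl (pvStepA []) st = st := by
  induction arrA generalizing st with
  | nil => rfl
  | cons a tl ih =>
    simp only [List.foldl_cons]
    have h : pvStepA [] st a = st := by
      unfold pvStepA
      simp [PySem.List.index?_eq_idxOf?]
    rw [h, ih]

-- a state locked at index 0 is never beaten (indices are nonnegative)
theorem pv_fold_zero (arrB arrA : List Int) (v : Option Int) :
    arrA.foldl (pvStepA arrB) (some 0, v) = (some 0, v) := by
  induction arrA generalizing v with
  | nil => rfl
  | cons a tl ih =>
    simp only [List.foldl_cons]
    have h : pvStepA arrB (some 0, v) a = (some 0, v) := by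
      unfold pvStepA
      cases h : PySem.List.index? arrB a with
      | none => rfl
      | some idx =>
        have hnn : ¬ ((idx : Int) < 0) := by omega
        simp [hnn]
    rw [h, ih]

-- if b heads arrB and occurs in arrA, the fold ends locked at (0, b)
theorem pv_fold_cons_mem (b : Int) (rest : List Int) :
    ∀ (arrA : List Int) (st : Option Int × Option Int),
      (st.1 = none ∨ ∃ e, st.1 = some e ∧ 0 < e) → b ∈ arrA →
      arrA.foldl (pvStepA (b :: rest)) st = (some 0, some b) := by
  intro arrA
  induction arrA with
  | nil => intro st _ hmem; cases hmem
  | cons a tl ih =>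
    intro st hinv hmem
    simp only [List.foldl_cons]
    by_cases hab : a = b
    · subst hab
      have hidx : PySem.List.index? (a :: rest) a = some 0 := PySem.List.index?_cons_self a rest
      rcases hinv with h | ⟨e, he, hpos⟩
      · have hs : pvStepA (a :: rest) st a = (some 0, some a) := by
          unfold pvStepA; rw [hidx]
          cases st with
          | mk s1 s2 => simp at h; subst h; rfl
        rw [hs, pv_fold_zero]
      · have hs : pvStepA (a :: rest) st a = (some 0, some a) := by
          unfold pvStepA; rw [hidx]
          cases st with
          | mk s1 s2 => simp at he; subst he; simp [hpos]
        rw [hs, pv_fold_zero]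
    · have hmem' : b ∈ tl := by
        cases hmem with
        | head => exact absurd rfl hab
        | tail _ h => exact h
      apply ih _ _ hmem'
      have hidx : PySem.List.index? (b :: rest) a =
          Option.map (fun x => x + 1) (PySem.List.index? rest a) :=
        PySem.List.index?_cons_of_ne rest (fun h => hab h.symm)
      unfold pvStepA
      rw [hidx]
      cases h : PySem.List.index? rest a with
      | none => simpa using hinv
      | some k =>
        simp only [Option.map_some]
        rcases hinv with h1 | ⟨e, he, hpos⟩
        · rw [h1]
          exact Or.inr ⟨((k + 1 : Nat) : Int), rfl, by omega⟩
        · rw [he]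
          by_cases hlt : (((k + 1 : Nat)) : Int) < e
          · simp only [if_pos hlt]
            exact Or.inr ⟨((k + 1 : Nat) : Int), rfl, by omega⟩
          · simp only [if_neg hlt]
            exact Or.inr ⟨e, he, hpos⟩

-- if b heads arrB but is absent from arrA, the fold is the fold over rest with indices shifted
theorem pv_fold_shift (b : Int) (rest : List Int) :
    ∀ (arrA : List Int) (st : Option Int × Option Int), b ∉ arrA →
      arrA.foldl (pvStepA (b :: rest)) (st.1.map (· + 1), st.2) =
        ((arrA.foldl (pvStepA rest) st).1.map (· + 1), (arrA.foldl (pvStepA rest) st).2) := by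
  intro arrA
  induction arrA with
  | nil => intro st _; rfl
  | cons a tl ih =>
    intro st hb
    have hab : b ≠ a := fun h => hb (by simp [h])
    have hbt : b ∉ tl := fun h => hb (List.mem_cons_of_mem _ h)
    simp only [List.foldl_cons]
    have hstep : pvStepA (b :: rest) (st.1.map (· + 1), st.2) a =
        ((pvStepA rest st a).1.map (· + 1), (pvStepA rest st a).2) := by
      unfold pvStepA
      rw [PySem.List.index?_cons_of_ne rest hab]
      cases hk : PySem.List.index? rest a with
      | none => rfl
      | some k =>
        cases hst : st.1 with
        | none => simp
        | some e =>
          simp only [Option.map_some]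
          have hcast : (((k + 1 : Nat) : Int) < e + 1) ↔ ((k : Int) < e) := by omega
          by_cases hlt : (k : Int) < e
          · simp [hlt]
          · simp [hlt, hst]
    rw [hstep, ih _ hbt]

-- main correspondence: B's scan at offset i reports A's fold result with indices shifted by i
theorem pv_main (arrA : List Int) : ∀ (arrB : List Int) (i : Int),
    pvAltGo (PySem.Set.ofList arrA) i arrB =
      [("value", (arrA.foldl (pvStepA arrB) (none, none)).2),
       ("index", some (match (arrA.foldl (pvStepA arrB) (none, none)).1 with
                       | none => -1 | some e => e + i))] := by
  intro arrB
  induction arrB with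
  | nil =>
    intro i
    rw [pv_fold_nil]
    rfl
  | cons b rest ih =>
    intro i
    by_cases hb : b ∈ arrA
    · have hmem : b ∈ PySem.Set.ofList arrA := (PySem.Set.mem_ofList arrA b).mpr hb
      rw [pv_fold_cons_mem b rest arrA (none, none) (Or.inl rfl) hb]
      simp [pvAltGo, hmem]
    · have hmem : b ∉ PySem.Set.ofList arrA := fun h => hb ((PySem.Set.mem_ofList arrA b).mp h)
      have hshift := pv_fold_shift b rest arrA ((none, none) : Option Int × Option Int) hb
      simp only [Option.map_none] at hshift
      rw [hshift]
      simp only [pvAltGo, if_neg hmem]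
      rw [ih (i + 1)]
      rcases hE : (arrA.foldl (pvStepA rest) ((none, none) : Option Int × Option Int)).1 with _ | e
      · rfl
      · simp only [Option.map_some]
        have : e + 1 + i = e + (i + 1) := by omega
        rw [this]

-- ===== VERDICT (by name: the statement is the Claim_ definition above) =====
theorem find_earliest_index_in_arrayB_spec : Claim_equal_find_earliest_index_in_arrayB := by
  intro arrA arrB _
  unfold Spec_find_earliest_index_in_arrayB find_earliest_index_in_arrayB find_earliest_index_in_arrayB_alt
  rw [pv_main arrA arrB 0]
  rcases hE : (arrA.foldl (pvStepA arrB) ((none, none) : Option Int × Option Int)).1 with _ | e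
  · rfl
  · simp
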